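-- pv_equiv track=rewrite | github.com/acabhishek942/ProjectEuler | Solutions/pe#51..py | fillPattern
-- ===== SOURCE A (Python) =====
-- def fillPattern(pattern, number):
--   fillPattern =  [0] * len(pattern)
--   temp =  number
--   for index, i in enumerate(pattern):
--     if i == 1:
--       fillPattern[index] = temp % 10
--       temp = int(temp / 10)
--     else:
--       fillPattern[index] = -1
--   return fillPattern
-- ===== SOURCE B (Python) =====
-- def fillPattern(pattern, number):
--     # Phase 1: produce exactly as many digits as the pattern has 1-entries.
--     ones = sum(1 for i in pattern if i == 1)
--     digs = []
--     temp = number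
--     for _ in range(ones):
--         digs.append(temp % 10)
--         temp = int(temp / 10)
--     # Phase 2: fill the pattern from the produced digit list.
--     it = iter(digs)
--     return [next(it) if i == 1 else -1 for i in pattern]
-- ===== Notes on version B (the rewrite author's own statement) =====
-- stated objective: alternative
-- what changed: A's single fused loop that threads the running quotient through the pattern walk is split into two phases: first count the 1-entries and produce exactly that many digits (same temp % 10 / int(temp / 10) steps), then map the pattern over that precomputed digit list.
import Mathlib
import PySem

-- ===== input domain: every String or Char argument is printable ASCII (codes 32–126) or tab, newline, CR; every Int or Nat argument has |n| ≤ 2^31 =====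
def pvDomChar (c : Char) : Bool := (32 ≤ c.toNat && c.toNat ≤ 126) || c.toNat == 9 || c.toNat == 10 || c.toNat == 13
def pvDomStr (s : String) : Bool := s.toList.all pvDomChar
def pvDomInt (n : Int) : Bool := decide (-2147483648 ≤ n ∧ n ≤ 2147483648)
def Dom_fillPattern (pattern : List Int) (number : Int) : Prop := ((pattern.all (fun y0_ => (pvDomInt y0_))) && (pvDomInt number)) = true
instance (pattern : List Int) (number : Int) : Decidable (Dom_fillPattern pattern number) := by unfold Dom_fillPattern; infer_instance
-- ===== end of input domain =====

-- B splits A's fused quotient-threading loop into two phases (count 1s and produce the digits, then fill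
-- the pattern from that list); objective: alternative decomposition, same cost. Equal return values proved.

-- ===== PORT A =====
-- A's loop over enumerate(pattern): the in-order assignments into a prefilled array become the built list.
-- Python's `int(temp / 10)` is truncating division, exact for |temp| ≤ 2^31 (floats are exact below 2^53
-- and each step shrinks |temp|): ported as Int.tdiv (Lean's truncating division).
def fillPatternLoop (pattern : List Int) (temp : Int) : List Int :=
  match pattern with
  | [] => []
  | i :: rest =>
    if i = 1 then PySem.Int.mod temp 10 :: fillPatternLoop rest (Int.tdiv temp 10)
    else (-1) :: fillPatternLoop rest temp

def fillPattern (pattern : List Int) (number : Int) : List Int :=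
  fillPatternLoop pattern number

-- ===== PORT B =====
-- ones = sum(1 for i in pattern if i == 1)
def pvOnes (pattern : List Int) : Nat := pattern.countP (fun i => i == 1)

-- the digit-producing loop: `for _ in range(ones): digs.append(temp % 10); temp = int(temp / 10)`
def pvDigits : Nat → Int → List Int
  | 0, _ => []
  | k + 1, temp => PySem.Int.mod temp 10 :: pvDigits k (Int.tdiv temp 10)

-- the filling comprehension, consuming the digit list like `next(it)`
def pvFill : List Int → List Int → List Int
  | [], _ => []
  | i :: rest, ds => if i = 1 then ds.headI :: pvFill rest ds.tail else (-1) :: pvFill rest ds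

def fillPattern_alt (pattern : List Int) (number : Int) : List Int :=
  pvFill pattern (pvDigits (pvOnes pattern) number)

-- ===== PRECONDITION & SPEC =====
def Spec_fillPattern (pattern : List Int) (number : Int) (out : List Int) : Prop := out = fillPattern_alt pattern number
instance (pattern : List Int) (number : Int) (out : List Int) : Decidable (Spec_fillPattern pattern number out) := by unfold Spec_fillPattern; infer_instance

-- ===== CLAIM (what is proved, stated in full; the proofs are below) =====
def Claim_equal_fillPattern : Prop := ∀ (pattern : List Int) (number : Int), Dom_fillPattern pattern number → Spec_fillPattern pattern number (fillPattern pattern number)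

-- ===== LEMMAS AND PROOFS =====
theorem pvFill_digits (pattern : List Int) (temp : Int) :
    pvFill pattern (pvDigits (pvOnes pattern) temp) = fillPatternLoop pattern temp := by
  induction pattern generalizing temp with
  | nil => rfl
  | cons i rest ih =>
    by_cases h : i = 1
    · simp only [pvOnes, List.countP_cons, h, pvDigits, pvFill, fillPatternLoop,
        beq_self_eq_true, if_true, List.tail_cons, List.headI_cons]
      exact congrArg _ (ih _)
    · simp only [pvOnes, List.countP_cons, h, pvFill, fillPatternLoop,
        beq_iff_eq, if_false, Nat.add_zero]
      exact congrArg _ (ih _)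

-- ===== VERDICT (by name: the statement is the Claim_ definition above) =====
theorem fillPattern_spec : Claim_equal_fillPattern := by
  intro pattern number _
  unfold Spec_fillPattern fillPattern fillPattern_alt
  exact (pvFill_digits pattern number).symm
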